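-- pv_equiv track=rewrite | github.com/BFZD233/MyMimic | scripts/rsl_rl/train_ours.py | _rewrite_env_overrides
-- ===== SOURCE A (Python) =====
-- def _rewrite_env_overrides(overrides: list[str]) -> list[str]:
--     rewritten: list[str] = []
--     for token in overrides:
--         prefix = ""
--         body = token
--         # Preserve Hydra prefix operators (e.g. +, ++, ~).
--         while body.startswith("+"):
--             prefix += "+"
--             body = body[1:]
--         if body.startswith("~"):
--             prefix += "~"
--             body = body[1:]
--
--         if body.startswith("obs_pipeline") and not body.startswith("env.obs_pipeline"):
--             body = "env." + body
--         if body.startswith("commands.") and not body.startswith("env.commands."):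
--             body = "env." + body
--         rewritten.append(prefix + body)
--     return rewritten
-- ===== SOURCE B (Python) =====
-- import re
--
-- _TOKEN_RE = re.compile(r"(\+*~?)(.*)", re.DOTALL)
--
--
-- def _rewrite_token(token: str) -> str:
--     op, body = _TOKEN_RE.match(token).groups()
--     if body.startswith("obs_pipeline") and not body.startswith("env.obs_pipeline"):
--         body = "env." + body
--     if body.startswith("commands.") and not body.startswith("env.commands."):
--         body = "env." + body
--     return op + body
--
--
-- def _rewrite_env_overrides(overrides: list[str]) -> list[str]:
--     return [_rewrite_token(t) for t in overrides]
-- ===== Notes on version B (the rewrite author's own statement) =====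
-- stated objective: idiomatic
-- what changed: Replaces the char-by-char while-loop peeling of '+' and the separate '~' check with a single regex parse ^(\+*~?)(.*)$ per token (takeWhile/dropWhile split in the port), applied in a per-token helper over a list comprehension instead of an accumulator loop.
import Mathlib
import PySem

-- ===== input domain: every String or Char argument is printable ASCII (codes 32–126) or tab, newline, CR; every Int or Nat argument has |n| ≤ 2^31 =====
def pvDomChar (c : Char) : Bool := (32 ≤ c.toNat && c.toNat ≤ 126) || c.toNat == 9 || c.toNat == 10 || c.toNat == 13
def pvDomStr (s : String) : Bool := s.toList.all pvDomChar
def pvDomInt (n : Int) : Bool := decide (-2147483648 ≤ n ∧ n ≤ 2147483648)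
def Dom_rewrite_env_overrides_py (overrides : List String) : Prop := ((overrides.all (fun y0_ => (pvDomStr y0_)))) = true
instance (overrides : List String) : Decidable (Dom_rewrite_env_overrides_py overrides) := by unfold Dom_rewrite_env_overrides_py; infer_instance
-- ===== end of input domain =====

-- B replaces A's char-by-char while-loop prefix peeling with a single regex-style
-- parse (\+*~? = takeWhile/dropWhile plus one optional ~) per token; objective: idiomatic.

-- ===== PORT A =====
-- A's `while body.startswith("+")` loop: peel one '+' at a time, growing the prefix.
def pvPeelPlusA (pre body : List Char) : List Char × List Char :=
  match body with
  | c :: rest => if c = '+' then pvPeelPlusA (pre ++ ['+']) rest else (pre, c :: rest)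
  | [] => (pre, [])

-- one iteration of A's for-loop body (strings handled as their char lists, exact on Dom)
def pvTokenA (token : String) : String :=
  let p1 := pvPeelPlusA [] token.toList
  let p2 :=
    if PySem.Chars.startswith p1.2 "~".toList then (p1.1 ++ ['~'], p1.2.drop 1) else p1
  let body3 :=
    if PySem.Chars.startswith p2.2 "obs_pipeline".toList
        && !PySem.Chars.startswith p2.2 "env.obs_pipeline".toList
      then "env.".toList ++ p2.2 else p2.2
  let body4 :=
    if PySem.Chars.startswith body3 "commands.".toList
        && !PySem.Chars.startswith body3 "env.commands.".toList
      then "env.".toList ++ body3 else body3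
  String.ofList (p2.1 ++ body4)

def rewrite_env_overrides_py (overrides : List String) : List String :=
  overrides.foldl (fun rewritten token => rewritten ++ [pvTokenA token]) []

-- ===== PORT B =====
-- regex ^(\+*~?)(.*)$ : maximal run of '+' then at most one '~' is the operator prefix
def pvSplitTokenB (t : List Char) : List Char × List Char :=
  let plus := t.takeWhile (· = '+')
  match t.dropWhile (· = '+') with
  | [] => (plus, [])
  | c :: rest => if c = '~' then (plus ++ ['~'], rest) else (plus, c :: rest)

def pvFixBodyB (body : List Char) : List Char :=
  let b1 :=
    if PySem.Chars.startswith body "obs_pipeline".toList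
        && !PySem.Chars.startswith body "env.obs_pipeline".toList
      then "env.".toList ++ body else body
  if PySem.Chars.startswith b1 "commands.".toList
      && !PySem.Chars.startswith b1 "env.commands.".toList
    then "env.".toList ++ b1 else b1

def pvTokenB (token : String) : String :=
  let ob := pvSplitTokenB token.toList
  String.ofList (ob.1 ++ pvFixBodyB ob.2)

def rewrite_env_overrides_py_alt (overrides : List String) : List String :=
  overrides.map pvTokenB

-- ===== PRECONDITION & SPEC =====
def Spec_rewrite_env_overrides_py (overrides : List String) (out : List String) : Prop := out = rewrite_env_overrides_py_alt overrides
instance (overrides : List String) (out : List String) : Decidable (Spec_rewrite_env_overrides_py overrides out) := by unfold Spec_rewrite_env_overrides_py; infer_instance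

-- ===== CLAIM (what is proved, stated in full; the proofs are below) =====
def Claim_equal_rewrite_env_overrides_py : Prop := ∀ (overrides : List String), Dom_rewrite_env_overrides_py overrides → Spec_rewrite_env_overrides_py overrides (rewrite_env_overrides_py overrides)

-- ===== LEMMAS AND PROOFS =====

theorem pvPeelPlusA_eq (body : List Char) : ∀ pre,
    pvPeelPlusA pre body = (pre ++ body.takeWhile (· = '+'), body.dropWhile (· = '+')) := by
  induction body with
  | nil => intro pre; simp [pvPeelPlusA]
  | cons c rest ih =>
      intro pre
      by_cases h : c = '+'
      · simp [pvPeelPlusA, h, List.takeWhile, List.dropWhile, ih]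
      · simp [pvPeelPlusA, h, List.takeWhile, List.dropWhile]

theorem pvToken_eq (token : String) : pvTokenA token = pvTokenB token := by
  unfold pvTokenA pvTokenB pvSplitTokenB pvFixBodyB
  rw [pvPeelPlusA_eq]
  cases hd : token.toList.dropWhile (· = '+') with
  | nil => simp [PySem.Chars.startswith]
  | cons c rest =>
      by_cases hc : c = '~'
      · subst hc; simp [PySem.Chars.startswith]
      · have hs : PySem.Chars.startswith (c :: rest) ['~'] = false := by
          simp [PySem.Chars.startswith, List.isPrefixOf]
          exact fun h => hc h.symm
        simp [hs, hc]

theorem foldl_append_map (l : List String) : ∀ acc,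
    l.foldl (fun rewritten token => rewritten ++ [pvTokenA token]) acc = acc ++ l.map pvTokenA := by
  induction l with
  | nil => intro acc; simp
  | cons x xs ih => intro acc; simp [ih]

-- ===== VERDICT (by name: the statement is the Claim_ definition above) =====
theorem rewrite_env_overrides_py_spec : Claim_equal_rewrite_env_overrides_py := by
  intro overrides _
  unfold Spec_rewrite_env_overrides_py rewrite_env_overrides_py rewrite_env_overrides_py_alt
  rw [foldl_append_map]
  simp [pvToken_eq]
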